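-- pv_equiv track=rewrite | github.com/briannatran1/hackerrank-python | zigzag.py | solution
-- ===== SOURCE A (Python) =====
-- def solution(numbers):
--     '''req:
--         - fn takes arr of int
--         - return arr of 1s and 0s; 1 --> zigzag
--
--         >>> [1,2,1,3,4]
--         [1,1,0]
--     '''
--     zigzag_triplets = []
--     n = len(numbers)
--
--     for i in range(n - 2):
--         if is_zigzag(numbers[i], numbers[i + 1], numbers[i + 2]):
--             zigzag_triplets.append(1)
--         else:
--             zigzag_triplets.append(0)
--
--     return zigzag_triplets
--
-- def is_zigzag(a, b, c):
--     '''checks if 3 elems are a zigzag'''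
--     return (a > b < c) or (a < b > c)
-- ===== SOURCE B (Python) =====
-- def solution(numbers):
--     # Two-stage pass: derive the sign sequence of consecutive differences,
--     # then mark adjacent sign pairs that are strictly opposite.
--     def sign(d):
--         return (d > 0) - (d < 0)
--     signs = [sign(numbers[i + 1] - numbers[i]) for i in range(len(numbers) - 1)]
--     return [1 if signs[j] * signs[j + 1] < 0 else 0 for j in range(len(signs) - 1)]
-- ===== Notes on version B (the rewrite author's own statement) =====
-- stated objective: alternative
-- what changed: B replaces A's direct triplet scan (is_zigzag on numbers[i..i+2]) by a two-stage pass: first a derived list of signs of consecutive differences, then a pass over adjacent sign pairs marking strictly opposite nonzero signs.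
import Mathlib
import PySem

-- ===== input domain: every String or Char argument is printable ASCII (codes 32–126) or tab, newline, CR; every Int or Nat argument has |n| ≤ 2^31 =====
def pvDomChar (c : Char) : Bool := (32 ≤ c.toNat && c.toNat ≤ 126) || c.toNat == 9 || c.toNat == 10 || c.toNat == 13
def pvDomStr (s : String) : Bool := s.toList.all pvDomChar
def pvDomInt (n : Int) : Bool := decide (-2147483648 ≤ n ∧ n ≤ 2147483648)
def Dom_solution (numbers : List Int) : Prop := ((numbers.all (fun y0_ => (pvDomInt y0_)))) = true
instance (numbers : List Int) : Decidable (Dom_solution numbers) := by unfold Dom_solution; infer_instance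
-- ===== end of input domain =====

-- B replaces A's direct triplet scan by a two-stage pass over difference signs; alternative decomposition, same cost.


-- ===== PORT A =====
def is_zigzag (a b c : Int) : Bool := (a > b && b < c) || (a < b && b > c)

def solution (numbers : List Int) : List Int :=
  (PySem.List.pyRange 0 ((numbers.length : Int) - 2) 1).foldl
    (fun acc i =>
      if is_zigzag (PySem.List.pyGetD numbers i 0)
                   (PySem.List.pyGetD numbers (i + 1) 0)
                   (PySem.List.pyGetD numbers (i + 2) 0)
      then acc ++ [1] else acc ++ [0])
    []

-- ===== PORT B =====
def pySign (d : Int) : Int := (if d > 0 then 1 else 0) - (if d < 0 then 1 else 0)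

def solution_alt (numbers : List Int) : List Int :=
  let signs := (PySem.List.pyRange 0 ((numbers.length : Int) - 1) 1).map
      (fun i => pySign (PySem.List.pyGetD numbers (i + 1) 0 - PySem.List.pyGetD numbers i 0))
  (PySem.List.pyRange 0 ((signs.length : Int) - 1) 1).map
      (fun j => if PySem.List.pyGetD signs j 0 * PySem.List.pyGetD signs (j + 1) 0 < 0 then 1 else 0)

-- ===== PRECONDITION & SPEC =====
def Spec_solution (numbers : List Int) (out : List Int) : Prop := out = solution_alt numbers
instance (numbers : List Int) (out : List Int) : Decidable (Spec_solution numbers out) := by unfold Spec_solution; infer_instance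

-- ===== CLAIM (what is proved, stated in full; the proofs are below) =====
def Claim_equal_solution : Prop := ∀ (numbers : List Int), Dom_solution numbers → Spec_solution numbers (solution numbers)

-- ===== LEMMAS AND PROOFS =====

-- A's fold is a map over its index range.
theorem solution_eq_map (numbers : List Int) :
    solution numbers =
      (PySem.List.pyRange 0 ((numbers.length : Int) - 2) 1).map
        (fun i => if is_zigzag (PySem.List.pyGetD numbers i 0)
                               (PySem.List.pyGetD numbers (i + 1) 0)
                               (PySem.List.pyGetD numbers (i + 2) 0)
                  then (1 : Int) else 0) := by
  unfold solution
  have h : (fun (acc : List Int) (i : Int) =>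
      if is_zigzag (PySem.List.pyGetD numbers i 0)
                   (PySem.List.pyGetD numbers (i + 1) 0)
                   (PySem.List.pyGetD numbers (i + 2) 0)
      then acc ++ [1] else acc ++ [0]) =
      (fun (acc : List Int) (i : Int) =>
        acc ++ [if is_zigzag (PySem.List.pyGetD numbers i 0)
                             (PySem.List.pyGetD numbers (i + 1) 0)
                             (PySem.List.pyGetD numbers (i + 2) 0)
                then (1 : Int) else 0]) := by
    funext acc i; split_ifs <;> rfl
  rw [h, PySem.List.foldl_append_singleton_eq_map, List.nil_append]

-- The pointwise fact: a triplet is a zigzag iff the two difference signs are strictly opposite.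
theorem zigzag_iff_sign (a b c : Int) :
    (if is_zigzag a b c then (1 : Int) else 0) =
      (if pySign (b - a) * pySign (c - b) < 0 then (1 : Int) else 0) := by
  unfold is_zigzag pySign
  rcases lt_trichotomy a b with h1 | h1 | h1 <;>
    rcases lt_trichotomy b c with h2 | h2 | h2 <;>
      simp [h1, h2, sub_neg, not_lt_of_gt]

theorem solution_spec_aux (numbers : List Int) :
    solution numbers = solution_alt numbers := by
  rw [solution_eq_map]
  unfold solution_alt
  set n := numbers.length with hn
  simp only []
  apply List.ext_getElem
  · simp [PySem.List.length_pyRange_one]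
    omega
  · intro k h1 h2
    simp only [List.getElem_map, PySem.List.getElem_pyRange_one, zero_add]
    have hlen : ((PySem.List.pyRange 0 ((n : Int) - 1) 1).map
        (fun i => pySign (PySem.List.pyGetD numbers (i + 1) 0 - PySem.List.pyGetD numbers i 0))).length
        = ((n : Int) - 1).toNat := by
      simp [PySem.List.length_pyRange_one]
    have hk2 : (k : Int) + 2 < (n : Int) := by
      have := h1
      simp [PySem.List.length_pyRange_one] at this
      omega
    rw [PySem.List.pyGetD_map_pyRange_of_nonneg _ _ (k : Int) _ (by omega) (by omega)]
    rw [PySem.List.pyGetD_map_pyRange_of_nonneg _ _ ((k : Int) + 1) _ (by omega) (by omega)]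
    rw [← zigzag_iff_sign]
    have h12 : (k : Int) + 1 + 1 = (k : Int) + 2 := by ring
    rw [h12]

-- ===== VERDICT (by name: the statement is the Claim_ definition above) =====
theorem solution_spec : Claim_equal_solution := by
  intro numbers _
  unfold Spec_solution
  exact solution_spec_aux numbers
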